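-- pv_equiv track=rewrite | github.com/Divyajyoti1801/Interview_Prepration | Technical_Interview_Concepts/Backtracking/Find_Unique_Binary_String.py | unique_binary_string
-- ===== SOURCE A (Python) =====
-- def unique_binary_string(nums):
--     strSet = {s for s in nums}
--
--     def backtrack(i, curr):
--         if i == len(nums):
--             res = "".join(curr)
--             return None if res in strSet else res
--
--         res = backtrack(i+1, curr)
--         if res:
--             return res
--
--         curr[i] = "1"
--         res = backtrack(i+1, curr)
--         if res:
--             return res
--
--     return backtrack(0, ["0" for s in nums])
-- ===== SOURCE B (Python) =====
-- def unique_binary_string(nums):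
--     # A's backtracking never resets a bit to "0", so the only candidates it
--     # ever tests are the "ladder" strings 0^(n-k) 1^k for k = 0..n, in that
--     # order; it returns the first one absent from nums.  B produces the same
--     # answer directly, without recursion or mutation.
--     n = len(nums)
--     present = set(nums)
--     for k in range(n + 1):
--         cand = "0" * (n - k) + "1" * k
--         if cand not in present:
--             return cand
--     return None
-- ===== Notes on version B (the rewrite author's own statement) =====
-- stated objective: simpler
-- what changed: Replaces A's mutating backtracking recursion (which, never resetting bits to '0', effectively enumerates only the strings 0^(n-k)1^k) by a direct loop over those n+1 ladder candidates, returning the first one not in the set.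
import Mathlib
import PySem

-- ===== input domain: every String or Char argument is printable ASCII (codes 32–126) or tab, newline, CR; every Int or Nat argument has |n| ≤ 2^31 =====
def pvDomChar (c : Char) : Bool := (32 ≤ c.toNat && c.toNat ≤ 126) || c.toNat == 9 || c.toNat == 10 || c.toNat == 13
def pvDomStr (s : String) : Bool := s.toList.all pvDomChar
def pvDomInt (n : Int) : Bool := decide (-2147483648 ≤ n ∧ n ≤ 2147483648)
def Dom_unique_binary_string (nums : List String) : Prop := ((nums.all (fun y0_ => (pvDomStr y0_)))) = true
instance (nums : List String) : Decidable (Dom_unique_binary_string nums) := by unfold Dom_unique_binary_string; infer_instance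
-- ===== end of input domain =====

-- B replaces A's mutating backtracking recursion by a direct scan of the n+1
-- ladder candidates 0^(n-k)1^k that A effectively enumerates.

-- ===== PORT A =====
-- Python's `if res:` — res is None or a string; truthy = some nonempty string.
def pyTruthyStr (o : Option String) : Bool :=
  match o with
  | some s => !(s == "")
  | none => false

-- Python passes `curr` by reference and `backtrack` mutates it, so the port
-- threads the list through as state and returns (result, mutated curr).
def btA (strSet : PySem.Set String) (n : Nat) (i : Nat) (curr : List String) :
    Option String × List String :=
  if i = n then
    let res := PySem.Str.join "" curr
    (if strSet.contains res then none else some res, curr)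
  else
    if h : i < n then
      let p := btA strSet n (i + 1) curr
      if pyTruthyStr p.1 then p
      else
        let curr2 := p.2.set i "1"   -- curr[i] = "1" ; 0 ≤ i < len(curr) throughout
        let q := btA strSet n (i + 1) curr2
        if pyTruthyStr q.1 then q else (none, q.2)
    else (none, curr)  -- totality guard only; unreachable since i ≤ n always
termination_by n - i
decreasing_by all_goals omega

def unique_binary_string (nums : List String) : Option String :=
  let strSet := PySem.Set.ofList nums
  (btA strSet nums.length 0 (nums.map (fun _ => "0"))).1

-- ===== PORT B =====
-- `for k in range(n+1): …` with early return.
def altLoop (present : PySem.Set String) (n : Nat) : List Nat → Option String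
  | [] => none
  | k :: ks =>
      let cand := String.ofList (List.replicate (n - k) '0' ++ List.replicate k '1')
      if present.contains cand then altLoop present n ks else some cand

def unique_binary_string_alt (nums : List String) : Option String :=
  let n := nums.length
  let present := PySem.Set.ofList nums
  altLoop present n (List.range (n + 1))

-- ===== PRECONDITION & SPEC =====
def Spec_unique_binary_string (nums : List String) (out : Option String) : Prop := out = unique_binary_string_alt nums
instance (nums : List String) (out : Option String) : Decidable (Spec_unique_binary_string nums out) := by unfold Spec_unique_binary_string; infer_instance

-- ===== CLAIM (what is proved, stated in full; the proofs are below) =====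
def Claim_equal_unique_binary_string : Prop := ∀ (nums : List String), Dom_unique_binary_string nums → Spec_unique_binary_string nums (unique_binary_string nums)

-- ===== LEMMAS AND PROOFS =====

-- first element of the list not contained in S
def firstNotIn (S : PySem.Set String) : List String → Option String
  | [] => none
  | t :: ts => if S.contains t then firstNotIn S ts else some t

-- the candidate strings A tests from state  p ++ 0^a ++ 1^b  (j = 0..a)
def cands (p : List String) (a b : Nat) : List String :=
  (List.range (a + 1)).map
    (fun j => PySem.Str.join "" (p ++ List.replicate (a - j) "0" ++ List.replicate (b + j) "1"))

theorem firstNotIn_append (S : PySem.Set String) (xs ys : List String) :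
    firstNotIn S (xs ++ ys) =
      (match firstNotIn S xs with
       | some t => some t
       | none => firstNotIn S ys) := by
  induction xs with
  | nil => simp [firstNotIn]
  | cons x xs ih =>
      cases hc : S.contains x <;>
        simp only [List.cons_append, firstNotIn, hc, if_true, if_false,
          Bool.false_eq_true] <;> simp [ih]

theorem firstNotIn_some_mem (S : PySem.Set String) (l : List String) (t : String)
    (h : firstNotIn S l = some t) : t ∈ l := by
  induction l with
  | nil => simp [firstNotIn] at h
  | cons x xs ih =>
      rw [firstNotIn] at h
      by_cases hc : S.contains x = true
      · rw [if_pos hc] at h; exact List.mem_cons_of_mem _ (ih h)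
      · rw [if_neg hc] at h; simp at h; simp [h]

theorem join_nil_flatten (l : List (List Char)) :
    PySem.Chars.join [] l = l.flatten := by
  induction l with
  | nil => simpa using PySem.Chars.join_nil ([] : List Char)
  | cons x xs ih =>
      cases xs with
      | nil => simp [PySem.Chars.join_singleton]
      | cons y ys =>
          rw [PySem.Chars.join_cons_cons]
          simp only [List.flatten_cons] at *
          simp [ih]

theorem toList_join_empty (l : List String) :
    (PySem.Str.join "" l).toList = (l.map String.toList).flatten := by
  rw [PySem.Str.toList_join]
  have h0 : ("" : String).toList = [] := rfl
  rw [h0, join_nil_flatten]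

theorem join01_len : ∀ (l : List String), (∀ x ∈ l, x = "0" ∨ x = "1") →
    (PySem.Str.join "" l).toList.length = l.length := by
  intro l
  induction l with
  | nil => intro _; simp [toList_join_empty]
  | cons x xs ih =>
      intro hp
      have hx := hp x (by simp)
      have ih' := ih (fun y hy => hp y (by simp [hy]))
      rw [toList_join_empty] at ih' ⊢
      have h0 : ("0" : String).toList = ['0'] := rfl
      have h1 : ("1" : String).toList = ['1'] := rfl
      rcases hx with h | h <;> subst h <;>
        simp [h0, h1, ih']

theorem join01_ne_empty (l : List String) (hp : ∀ x ∈ l, x = "0" ∨ x = "1")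
    (hl : 0 < l.length) : PySem.Str.join "" l ≠ "" := by
  intro h
  have hlen := join01_len l hp
  rw [h] at hlen
  have h0 : (("" : String)).toList = [] := rfl
  rw [h0] at hlen
  simp at hlen
  omega

theorem join_ne_empty_of_one (l : List String) (h : "1" ∈ l) :
    PySem.Str.join "" l ≠ "" := by
  intro he
  have h2 := congrArg String.toList he
  rw [toList_join_empty] at h2
  have h0 : ("" : String).toList = [] := rfl
  rw [h0] at h2
  have hmem : ['1'] ∈ l.map String.toList := by
    have h1 : ("1" : String).toList = ['1'] := rfl
    rw [← h1]; exact List.mem_map_of_mem h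
  have := (List.flatten_eq_nil_iff.mp h2) _ hmem
  simp at this

theorem rep01_mem (p : List String) (x y : Nat)
    (hp : ∀ t ∈ p, t = "0" ∨ t = "1") :
    ∀ s ∈ p ++ List.replicate x "0" ++ List.replicate y "1", s = "0" ∨ s = "1" := by
  intro s hs
  simp only [List.mem_append, List.mem_replicate] at hs
  rcases hs with (hs | hs) | hs
  · exact hp s hs
  · exact Or.inl hs.2
  · exact Or.inr hs.2

theorem set_len_append (p : List String) (l : List String) (v : String) :
    (p ++ l).set p.length v = p ++ l.set 0 v := by
  rw [List.set_append]
  simp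

theorem cands_ne_empty (p : List String) (a b : Nat)
    (hp : ∀ t ∈ p, t = "0" ∨ t = "1") (hpos : 0 < p.length + a + b) :
    ∀ t ∈ cands p a b, t ≠ "" := by
  intro t ht
  unfold cands at ht
  obtain ⟨j, hj, rfl⟩ := List.mem_map.mp ht
  have hj' : j ≤ a := Nat.lt_succ_iff.mp (List.mem_range.mp hj)
  apply join01_ne_empty _ (rep01_mem p (a - j) (b + j) hp)
  simp
  omega

theorem cands_succ (p : List String) (a b : Nat) :
    cands p (a + 1) b = cands (p ++ ["0"]) a b
      ++ [PySem.Str.join "" (p ++ List.replicate (a + 1 + b) "1")] := by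
  unfold cands
  rw [List.range_succ, List.map_append]
  congr 1
  · apply List.map_congr_left
    intro j hj
    have hj' : j ≤ a := Nat.lt_succ_iff.mp (List.mem_range.mp hj)
    have h1 : a + 1 - j = (a - j) + 1 := by omega
    rw [h1, List.replicate_succ]
    simp
  · have h2 : a + 1 - (a + 1) = 0 := by omega
    have h3 : b + (a + 1) = a + 1 + b := by omega
    simp [h2, h3]

-- all-ones suffix: every candidate A tests from here is the same string
theorem btA_ones (S : PySem.Set String) (b : Nat) (p : List String) :
    btA S (p.length + b) p.length (p ++ List.replicate b "1") =
      ((if S.contains (PySem.Str.join "" (p ++ List.replicate b "1")) then none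
        else some (PySem.Str.join "" (p ++ List.replicate b "1"))),
       p ++ List.replicate b "1") := by
  induction b generalizing p with
  | zero => rw [btA]; simp
  | succ b ih =>
      have hne : p.length ≠ p.length + (b + 1) := by omega
      have hlt : p.length < p.length + (b + 1) := by omega
      rw [btA]
      simp only [hne, if_false, hlt, dif_pos]
      have hsplit : p ++ List.replicate (b + 1) "1" = (p ++ ["1"]) ++ List.replicate b "1" := by
        simp [List.replicate_succ]
      have hn : p.length + (b + 1) = (p ++ ["1"]).length + b := by simp; omega
      have hi : p.length + 1 = (p ++ ["1"]).length := by simp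
      have hrec := ih (p ++ ["1"])
      rw [hsplit, hn, hi, hrec]
      set t := PySem.Str.join "" ((p ++ ["1"]) ++ List.replicate b "1") with ht
      have htne : t ≠ "" := join_ne_empty_of_one _ (by simp)
      have hset : ((p ++ ["1"]) ++ List.replicate b "1").set p.length "1"
          = (p ++ ["1"]) ++ List.replicate b "1" := by
        have h4 : (p ++ ["1"]) ++ List.replicate b "1" = p ++ ("1" :: List.replicate b "1") := by
          simp
        rw [h4, set_len_append]
        simp [h4]
      by_cases hmem : t ∈ S
      · have hm : S.contains t = true := (PySem.Set.contains_iff S t).mpr hmem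
        simp only [hm] at hrec ⊢
        simp only [reduceIte] at hrec ⊢
        simp at hrec
        simp [pyTruthyStr, hrec]
      · simp [hmem, pyTruthyStr, htne]

-- main invariant: from state p ++ 0^a ++ 1^b, A returns the first candidate
-- (in cands order) not in S, and on failure leaves the suffix all ones
theorem btA_main (S : PySem.Set String) :
    ∀ (a : Nat) (b : Nat) (p : List String), (∀ x ∈ p, x = "0" ∨ x = "1") →
      0 < p.length + a + b →
      ∃ c, btA S (p.length + a + b) p.length
              (p ++ List.replicate a "0" ++ List.replicate b "1")
            = (firstNotIn S (cands p a b), c)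
        ∧ (firstNotIn S (cands p a b) = none → c = p ++ List.replicate (a + b) "1") := by
  intro a
  induction a with
  | zero =>
      intro b p hp hpos
      have hc0 : cands p 0 b = [PySem.Str.join "" (p ++ List.replicate b "1")] := by
        unfold cands
        simp [List.range_succ]
      have harg : p ++ List.replicate 0 "0" ++ List.replicate b "1"
          = p ++ List.replicate b "1" := by simp
      have hn : p.length + 0 + b = p.length + b := by omega
      refine ⟨p ++ List.replicate b "1", ?_, fun _ => by simp⟩
      rw [harg, hn, btA_ones, hc0]
      simp [firstNotIn]
  | succ a ih =>
      intro b p hp hpos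
      have hne : p.length ≠ p.length + (a + 1) + b := by omega
      have hlt : p.length < p.length + (a + 1) + b := by omega
      rw [btA]
      simp only [hne, if_false, hlt, dif_pos]
      have hsplit : p ++ List.replicate (a + 1) "0" ++ List.replicate b "1"
          = (p ++ ["0"]) ++ List.replicate a "0" ++ List.replicate b "1" := by
        simp [List.replicate_succ]
      have hn : p.length + (a + 1) + b = (p ++ ["0"]).length + a + b := by simp; omega
      have hi : p.length + 1 = (p ++ ["0"]).length := by simp
      have hp' : ∀ x ∈ p ++ ["0"], x = "0" ∨ x = "1" := by
        intro x hx
        rcases List.mem_append.mp hx with h | h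
        · exact hp x h
        · simp at h; exact Or.inl h
      obtain ⟨c, hrec, hcnone⟩ := ih b (p ++ ["0"]) hp'
        (by simp only [List.length_append, List.length_cons, List.length_nil]; omega)
      rw [hsplit, hn, hi, hrec]
      rw [cands_succ, firstNotIn_append]
      cases hfi : firstNotIn S (cands (p ++ ["0"]) a b) with
      | some t =>
          have htmem := firstNotIn_some_mem S _ t hfi
          have htne : t ≠ "" :=
            cands_ne_empty (p ++ ["0"]) a b hp'
              (by simp only [List.length_append, List.length_cons, List.length_nil]; omega) t htmem
          simp [pyTruthyStr, htne]
      | none =>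
          have hc := hcnone hfi
          simp only [pyTruthyStr, Bool.false_eq_true, if_false]
          have hcset : c.set p.length "1" = (p ++ ["1"]) ++ List.replicate (a + b) "1" := by
            rw [hc]
            have h4 : (p ++ ["0"]) ++ List.replicate (a + b) "1"
                = p ++ ("0" :: List.replicate (a + b) "1") := by simp
            rw [h4, set_len_append]
            simp
          have hn2 : (p ++ ["0"]).length + a + b = (p ++ ["1"]).length + (a + b) := by
            simp only [List.length_append, List.length_cons, List.length_nil]; omega
          have hi2 : (p ++ ["0"]).length = (p ++ ["1"]).length := by simp
          rw [hcset, hn2, hi2, btA_ones]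
          have hsplit2 : (p ++ ["1"]) ++ List.replicate (a + b) "1"
              = p ++ List.replicate (a + 1 + b) "1" := by
            have h6 : a + 1 + b = (a + b) + 1 := by omega
            rw [h6, List.replicate_succ]
            simp
          rw [hsplit2]
          set t2 := PySem.Str.join "" (p ++ List.replicate (a + 1 + b) "1") with ht2
          have ht2ne : t2 ≠ "" := join_ne_empty_of_one _ (by
            refine List.mem_append.mpr (Or.inr ?_)
            rw [List.mem_replicate]
            exact ⟨by omega, rfl⟩)
          by_cases hmem : t2 ∈ S
          · refine ⟨p ++ List.replicate (a + 1 + b) "1", ?_, ?_⟩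
            · simp [hmem, pyTruthyStr, firstNotIn]
            · intro _
              rfl
          · refine ⟨p ++ List.replicate (a + 1 + b) "1", ?_, ?_⟩
            · simp [hmem, pyTruthyStr, ht2ne, firstNotIn]
            · intro hcontra
              simp [firstNotIn, hmem] at hcontra

theorem altLoop_eq (S : PySem.Set String) (n : Nat) : ∀ ks : List Nat,
    altLoop S n ks = firstNotIn S (ks.map
      (fun k => String.ofList (List.replicate (n - k) '0' ++ List.replicate k '1'))) := by
  intro ks
  induction ks with
  | nil => simp [altLoop, firstNotIn]
  | cons k ks ih =>
      cases hc : S.contains (String.ofList (List.replicate (n - k) '0' ++ List.replicate k '1')) <;>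
        simp only [altLoop, firstNotIn, List.map_cons, hc, if_true, if_false,
          Bool.false_eq_true] <;> simp [ih]

theorem join_rep (x y : Nat) :
    PySem.Str.join "" (List.replicate x "0" ++ List.replicate y "1")
      = String.ofList (List.replicate x '0' ++ List.replicate y '1') := by
  rw [← String.toList_inj, toList_join_empty, String.toList_ofList]
  have h0 : ("0" : String).toList = ['0'] := rfl
  have h1 : ("1" : String).toList = ['1'] := rfl
  simp [h0, h1]

theorem cands_nil_eq (n : Nat) :
    cands [] n 0 = (List.range (n + 1)).map
      (fun k => String.ofList (List.replicate (n - k) '0' ++ List.replicate k '1')) := by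
  unfold cands
  apply List.map_congr_left
  intro j hj
  simp only [List.nil_append, Nat.zero_add]
  exact join_rep (n - j) j

-- ===== VERDICT (by name: the statement is the Claim_ definition above) =====
theorem unique_binary_string_spec : Claim_equal_unique_binary_string := by
  unfold Claim_equal_unique_binary_string
  intro nums _
  unfold Spec_unique_binary_string
  cases nums with
  | nil =>
      have hjoin : PySem.Str.join "" ([] : List String) = "" := by
        rw [← String.toList_inj, toList_join_empty]
        rfl
      unfold unique_binary_string unique_binary_string_alt
      simp only [List.map_nil, List.length_nil]
      rw [btA]
      simp [hjoin, altLoop, List.range_succ]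
  | cons x xs =>
      unfold unique_binary_string unique_binary_string_alt
      simp only [List.map_const']
      set S := PySem.Set.ofList (x :: xs)
      set n := (x :: xs).length with hnn
      obtain ⟨c, hrec, -⟩ := btA_main S n 0 []
        (by simp) (by simp only [List.length_nil]; simp [hnn])
      simp only [List.length_nil, List.nil_append, List.replicate_zero, List.append_nil,
        Nat.zero_add, Nat.add_zero] at hrec
      rw [hrec, altLoop_eq, cands_nil_eq]
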